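-- pv_equiv track=rewrite | github.com/katri2/MAHDS_addition | testing_utils/stat_del-ins/get_di_stat.py | count_gaps
-- ===== SOURCE A (Python) =====
-- def count_gaps(seq, gap_sym:str="-") -> dict:
--     """
--     Returns gap openings count and overall gap count
--     keys: openings, gaps
--     """
--     openings_and_gaps = {"openings": 0, "gaps": 0}
--     prev_was_gap = False
--     for sym in seq:
--         if sym == gap_sym:
--             openings_and_gaps["gaps"] += 1
--             if not prev_was_gap:
--                 openings_and_gaps["openings"] += 1
--                 prev_was_gap = True
--         else:
--             prev_was_gap = False
--     return openings_and_gaps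
-- ===== SOURCE B (Python) =====
-- def count_gaps(seq, gap_sym: str = "-") -> dict:
--     """
--     Returns gap openings count and overall gap count
--     keys: openings, gaps
--     """
--     is_gap = [sym == gap_sym for sym in seq]
--     gaps = sum(is_gap)
--     openings = sum(1 for cur, prev in zip(is_gap, [False] + is_gap)
--                    if cur and not prev)
--     return {"openings": openings, "gaps": gaps}
-- ===== Notes on version B (the rewrite author's own statement) =====
-- stated objective: alternative
-- what changed: Replaces A's stateful prev_was_gap flag loop by a data-parallel formulation: build a boolean gap mask once, then gaps = sum of the mask and openings = count of True positions whose predecessor (mask shifted right by one, padded with False) is False, via zip over the mask and its shift.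
import Mathlib
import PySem

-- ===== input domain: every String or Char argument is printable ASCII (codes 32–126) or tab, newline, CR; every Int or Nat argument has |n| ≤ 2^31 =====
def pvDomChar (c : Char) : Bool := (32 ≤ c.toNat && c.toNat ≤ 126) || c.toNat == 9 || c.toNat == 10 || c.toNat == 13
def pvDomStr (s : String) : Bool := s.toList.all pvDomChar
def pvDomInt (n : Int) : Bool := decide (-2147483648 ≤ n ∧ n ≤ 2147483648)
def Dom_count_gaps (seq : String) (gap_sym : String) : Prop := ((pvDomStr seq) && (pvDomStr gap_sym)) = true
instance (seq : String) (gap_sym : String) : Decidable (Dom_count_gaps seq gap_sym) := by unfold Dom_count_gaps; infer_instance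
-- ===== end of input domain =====

-- B replaces A's stateful prev-flag loop by a data-parallel formulation: a boolean gap
-- mask built once, gaps = sum of the mask, openings = count of mask positions whose
-- shifted predecessor is False (alternative decomposition, same O(n) cost).


-- ===== PORT A =====
-- literal port: dict {"openings": 0, "gaps": 0}, prev_was_gap flag, loop over the characters;
-- 'sym == gap_sym' compares the one-character string to gap_sym, exactly as Python does.
def count_gaps (seq : String) (gap_sym : String) : List (String × Int) :=
  let init : PySem.Dict String Int := (PySem.Dict.empty.insert "openings" 0).insert "gaps" 0
  let st := seq.toList.foldl
    (fun (st : PySem.Dict String Int × Bool) sym =>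
      if String.ofList [sym] = gap_sym then
        let d := st.1.modify "gaps" 0 (· + 1)
        if !st.2 then (d.modify "openings" 0 (· + 1), true) else (d, st.2)
      else (st.1, false))
    (init, false)
  st.1.items

-- ===== PORT B =====
-- Source B: is_gap = [sym == gap_sym for sym in seq]; gaps = sum(is_gap);
-- openings = sum(1 for cur, prev in zip(is_gap, [False] + is_gap) if cur and not prev)
def count_gaps_alt (seq : String) (gap_sym : String) : List (String × Int) :=
  let is_gap : List Bool := seq.toList.map (fun sym => String.ofList [sym] == gap_sym)
  let gaps : Int := (is_gap.countP id : Nat)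
  let openings : Int := ((is_gap.zip (false :: is_gap)).filter (fun p => p.1 && !p.2)).length
  [("openings", openings), ("gaps", gaps)]

-- ===== PRECONDITION & SPEC =====
def Spec_count_gaps (seq : String) (gap_sym : String) (out : List (String × Int)) : Prop := out = count_gaps_alt seq gap_sym
instance (seq : String) (gap_sym : String) (out : List (String × Int)) : Decidable (Spec_count_gaps seq gap_sym out) := by unfold Spec_count_gaps; infer_instance

-- ===== CLAIM (what is proved, stated in full; the proofs are below) =====
def Claim_equal_count_gaps : Prop := ∀ (seq : String) (gap_sym : String), Dom_count_gaps seq gap_sym → Spec_count_gaps seq gap_sym (count_gaps seq gap_sym)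

-- ===== LEMMAS AND PROOFS =====

-- (openings, gaps) added by A's loop from a given prev flag
def pvAux (g : String) (prev : Bool) : List Char → Int × Int
  | [] => (0, 0)
  | c :: cs =>
    if String.ofList [c] = g then
      let r := pvAux g true cs
      (if prev then r.1 else r.1 + 1, r.2 + 1)
    else pvAux g false cs

theorem pvAux_cons (g : String) (prev : Bool) (c : Char) (cs : List Char) :
    pvAux g prev (c :: cs)
      = if String.ofList [c] = g then
          (if prev then (pvAux g true cs).1 else (pvAux g true cs).1 + 1, (pvAux g true cs).2 + 1)
        else pvAux g false cs := rfl

theorem pvFoldA (g : String) : ∀ (l : List Char) (o n : Int) (prev : Bool),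
    (l.foldl
      (fun (st : PySem.Dict String Int × Bool) sym =>
        if String.ofList [sym] = g then
          let d := st.1.modify "gaps" 0 (· + 1)
          if !st.2 then (d.modify "openings" 0 (· + 1), true) else (d, st.2)
        else (st.1, false))
      (PySem.Dict.mk [("openings", o), ("gaps", n)], prev)).1.items
      = [("openings", o + (pvAux g prev l).1), ("gaps", n + (pvAux g prev l).2)] := by
  intro l
  induction l with
  | nil => intro o n prev; simp [pvAux]
  | cons c cs ih =>
    intro o n prev
    rw [pvAux_cons]
    by_cases h : String.ofList [c] = g
    · have hm : ((PySem.Dict.mk [("openings", o), ("gaps", n)] : PySem.Dict String Int).modify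
          "gaps" 0 (· + 1)) = PySem.Dict.mk [("openings", o), ("gaps", n + 1)] := by
        simp [PySem.Dict.modify, PySem.Dict.insert, PySem.Dict.getD, PySem.Dict.get?]
      have hm2 : ((PySem.Dict.mk [("openings", o), ("gaps", n + 1)] : PySem.Dict String Int).modify
          "openings" 0 (· + 1)) = PySem.Dict.mk [("openings", o + 1), ("gaps", n + 1)] := by
        simp [PySem.Dict.modify, PySem.Dict.insert, PySem.Dict.getD, PySem.Dict.get?]
      rw [if_pos h]
      cases prev with
      | false =>
        rw [List.foldl_cons, if_pos h]
        simp only [Bool.not_false, ite_true, hm, hm2, Bool.false_eq_true, ite_false]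
        rw [ih]
        simp
        constructor <;> ring
      | true =>
        rw [List.foldl_cons, if_pos h]
        simp only [Bool.not_true, Bool.false_eq_true, ite_false, ite_true, hm]
        rw [ih]
        simp
        ring
    · rw [if_neg h, List.foldl_cons, if_neg h]
      rw [ih]

-- A's loop contribution equals B's mask/shift counts, for any starting flag
theorem pvMaskAux (g : String) : ∀ (l : List Char) (prev : Bool),
    pvAux g prev l =
      (((((l.map (fun c => String.ofList [c] == g)).zip
            (prev :: l.map (fun c => String.ofList [c] == g))).filter
            (fun p => p.1 && !p.2)).length : Int),
       (((l.map (fun c => String.ofList [c] == g)).countP id : Nat) : Int)) := by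
  intro l
  induction l with
  | nil => intro prev; simp [pvAux]
  | cons c cs ih =>
    intro prev
    rw [pvAux_cons]
    by_cases h : String.ofList [c] = g
    · have hb : (String.ofList [c] == g) = true := by simp [h]
      rw [if_pos h, ih true]
      simp only [List.map_cons, hb, List.zip_cons_cons, List.filter_cons, List.countP_cons,
        id, Bool.true_and]
      cases prev <;> simp
    · have hb : (String.ofList [c] == g) = false := by simp [h]
      rw [if_neg h, ih false]
      simp [List.map_cons, hb, List.zip_cons_cons]

-- ===== VERDICT (by name: the statement is the Claim_ definition above) =====
theorem count_gaps_spec : Claim_equal_count_gaps := by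
  intro seq gap_sym _
  show count_gaps seq gap_sym = count_gaps_alt seq gap_sym
  unfold count_gaps count_gaps_alt
  have hinit : ((PySem.Dict.empty.insert "openings" (0 : Int)).insert "gaps" 0 :
      PySem.Dict String Int) = PySem.Dict.mk [("openings", 0), ("gaps", 0)] := by decide
  simp only [hinit]
  rw [pvFoldA gap_sym seq.toList 0 0 false, pvMaskAux gap_sym seq.toList false]
  simp
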